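-- pv_equiv track=rewrite | github.com/ahmed3991/AdvancedAlgorithmsTP | complexity/tp2_extended.py | insertion_sort_exchanges
-- ===== SOURCE A (Python) =====
-- def insertion_sort_exchanges(arr):
--     comparisons = 0
--     moves = 0
--     n = len(arr)
--     for i in range(1, n):
--         j = i
--         while j > 0:
--             comparisons += 1
--             if arr[j] < arr[j - 1]:
--                 arr[j], arr[j - 1] = arr[j - 1], arr[j]
--                 moves += 1
--             else:
--                 break
--             j -= 1
--     return comparisons, moves
-- ===== SOURCE B (Python) =====
-- def insertion_sort_exchanges(arr):
--     """Count the comparisons and element moves insertion sort performs on arr.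
--
--     Each move carries an element past one larger predecessor, so moves equals
--     the number of inversions, counted here with a merge sort in O(n log n).
--     Comparisons are one per move plus the final probe that stops an element
--     short of the front, i.e. one for every element that is not a strict new
--     minimum of the values before it.
--     """
--     moves = _sorted_with_inversions(arr)[1]
--     comparisons = moves
--     lo = None
--     for x in arr:
--         if lo is None or x < lo:
--             lo = x
--         else:
--             comparisons += 1
--     return comparisons, moves
--
--
-- def _sorted_with_inversions(xs):
--     if len(xs) <= 1:
--         return list(xs), 0
--     mid = len(xs) // 2
--     left, a = _sorted_with_inversions(xs[:mid])
--     right, b = _sorted_with_inversions(xs[mid:])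
--     merged = []
--     inv = 0
--     i = j = 0
--     while i < len(left) and j < len(right):
--         if right[j] < left[i]:
--             merged.append(right[j])
--             j += 1
--             inv += len(left) - i
--         else:
--             merged.append(left[i])
--             i += 1
--     merged.extend(left[i:])
--     merged.extend(right[j:])
--     return merged, a + b + inv
-- ===== Notes on version B (the rewrite author's own statement) =====
-- stated objective: faster
-- what changed: Replaces the quadratic in-place swap loop by a merge-sort inversion count (the moves) plus one linear running-minimum pass (the stopping comparisons); note A sorts arr in place while B leaves it untouched, the return value is identical.
import Mathlib
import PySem

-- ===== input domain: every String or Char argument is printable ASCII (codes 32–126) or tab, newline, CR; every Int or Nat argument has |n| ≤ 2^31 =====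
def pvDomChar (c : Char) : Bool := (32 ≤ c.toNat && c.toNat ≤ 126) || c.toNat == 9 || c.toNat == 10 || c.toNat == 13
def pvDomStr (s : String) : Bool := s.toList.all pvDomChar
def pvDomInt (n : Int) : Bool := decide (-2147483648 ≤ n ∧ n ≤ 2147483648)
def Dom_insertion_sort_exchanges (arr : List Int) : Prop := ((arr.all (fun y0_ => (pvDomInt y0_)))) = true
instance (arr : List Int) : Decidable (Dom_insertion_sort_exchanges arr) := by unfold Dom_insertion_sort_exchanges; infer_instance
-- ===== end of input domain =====

-- B replaces A's quadratic swap loop by a merge-sort inversion count plus a linear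
-- running-minimum pass: asymptotically faster.  A sorts arr in place, B does not;
-- the equivalence proved here is about the return value.

-- ===== PORT A =====
-- A's inner 'while j > 0' loop; the indices j, j-1 are always in range, so getD is exact
def pvInnerA (arr : List Int) (j : Nat) (c m : Int) : List Int × Int × Int :=
  if 0 < j then
    let c' := c + 1
    let x := arr.getD j 0
    let y := arr.getD (j - 1) 0
    if x < y then
      pvInnerA ((arr.set j y).set (j - 1) x) (j - 1) c' (m + 1)
    else (arr, c', m)
  else (arr, c, m)
termination_by j

def insertion_sort_exchanges (arr : List Int) : Int × Int :=
  let n : Int := arr.length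
  let st := (PySem.List.pyRange 1 n 1).foldl
      (fun st i => pvInnerA st.1 i.toNat st.2.1 st.2.2) (arr, (0 : Int), (0 : Int))
  (st.2.1, st.2.2)

-- ===== PORT B =====
-- the merging while-loop of Source B's _sorted_with_inversions, counting cross inversions
def pvMergeC : List Int → List Int → List Int × Int
  | [], r => (r, 0)
  | a :: l, [] => (a :: l, 0)
  | a :: l, b :: r =>
    if b < a then
      let p := pvMergeC (a :: l) r
      (b :: p.1, p.2 + ((a :: l).length : Int))
    else
      let p := pvMergeC l (b :: r)
      (a :: p.1, p.2)
termination_by l r => l.length + r.length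

-- Source B's _sorted_with_inversions
def pvSortC (xs : List Int) : List Int × Int :=
  if xs.length ≤ 1 then (xs, 0)
  else
    let mid := xs.length / 2
    let pl := pvSortC (xs.take mid)
    let pr := pvSortC (xs.drop mid)
    let pm := pvMergeC pl.1 pr.1
    (pm.1, pl.2 + pr.2 + pm.2)
termination_by xs.length
decreasing_by
  · simp only [List.length_take]; omega
  · simp only [List.length_drop]; omega

def insertion_sort_exchanges_alt (arr : List Int) : Int × Int :=
  let moves := (pvSortC arr).2
  let p := arr.foldl
      (fun (p : Int × Option Int) x =>
        match p.2 with
        | none => (p.1, some x)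
        | some lo => if x < lo then (p.1, some x) else (p.1 + 1, some lo))
      (moves, none)
  (p.1, moves)

-- ===== PRECONDITION & SPEC =====
def Spec_insertion_sort_exchanges (arr : List Int) (out : Int × Int) : Prop := out = insertion_sort_exchanges_alt arr
instance (arr : List Int) (out : Int × Int) : Decidable (Spec_insertion_sort_exchanges arr out) := by unfold Spec_insertion_sort_exchanges; infer_instance

-- ===== CLAIM =====
def Claim_equal_insertion_sort_exchanges : Prop := ∀ (arr : List Int), Dom_insertion_sort_exchanges arr → Spec_insertion_sort_exchanges arr (insertion_sort_exchanges arr)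

-- ===== LEMMAS AND PROOFS =====

-- number of elements of s strictly greater than x
def pvGt (s : List Int) (x : Int) : Int := ((s.countP (fun a => decide (x < a)) : Nat) : Int)
-- 1 if A's inner loop on prefix s and element x ends with a failed comparison (break)
def pvBrk (s : List Int) (x : Int) : Int :=
  if s.countP (fun a => decide (x < a)) < s.length then 1 else 0
-- ordered insertion of x into sorted s (after the elements ≤ x)
def pvIns (s : List Int) (x : Int) : List Int :=
  s.filter (fun a => decide (a ≤ x)) ++ x :: s.filter (fun a => decide (x < a))
-- A's two counters, abstractly: prefix s (in any order), remaining elements u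
def pvCnt : List Int → List Int → Int × Int
  | _, [] => (0, 0)
  | s, x :: u =>
    let p := pvCnt (x :: s) u
    (pvGt s x + pvBrk s x + p.1, pvGt s x + p.2)
-- inversion count, peeling from the left
def pvInv : List Int → Int
  | [] => 0
  | a :: l => ((l.countP (fun b => decide (b < a)) : Nat) : Int) + pvInv l
-- pairs (a ∈ s, x ∈ u) with x < a
def pvCross (s u : List Int) : Int := (u.map (fun x => pvGt s x)).sum
-- number of elements of u that never drop below the running minimum (initially lo)
def pvNb (lo : Int) : List Int → Int
  | [] => 0
  | x :: u => if x < lo then pvNb x u else 1 + pvNb lo u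

theorem pvIns_perm (s : List Int) (x : Int) : (pvIns s x).Perm (x :: s) := by
  unfold pvIns
  have h : s.filter (fun a => decide (x < a)) = s.filter (fun a => !decide (a ≤ x)) :=
    List.filter_congr (by intro a _; simp [← decide_not, not_le])
  rw [h]
  exact List.perm_middle.trans ((List.filter_append_perm _ s).cons x)

theorem pvIns_sorted {s : List Int} (hs : s.Pairwise (· ≤ ·)) (x : Int) :
    (pvIns s x).Pairwise (· ≤ ·) := by
  unfold pvIns
  rw [List.pairwise_append]
  refine ⟨hs.filter _, ?_, ?_⟩
  · rw [List.pairwise_cons]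
    refine ⟨?_, hs.filter _⟩
    intro b hb
    have := List.of_mem_filter hb
    simp only [decide_eq_true_eq] at this
    exact le_of_lt this
  · intro a ha b hb
    have ha' := List.of_mem_filter ha
    simp only [decide_eq_true_eq] at ha'
    rcases List.mem_cons.mp hb with rfl | hb'
    · exact ha'
    · have := List.of_mem_filter hb'
      simp only [decide_eq_true_eq] at this
      exact le_of_lt (lt_of_le_of_lt ha' this)

theorem pvIns_length (s : List Int) (x : Int) : (pvIns s x).length = s.length + 1 := by
  simpa using (pvIns_perm s x).length_eq

theorem pvGetD_mid (s t : List Int) (a b d : Int) :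
    (s ++ a :: b :: t).getD s.length d = a := by
  induction s with
  | nil => rfl
  | cons y s _ => simp

theorem pvGetD_mid1 (s t : List Int) (a b d : Int) :
    (s ++ a :: b :: t).getD (s.length + 1) d = b := by
  induction s with
  | nil => rfl
  | cons y s _ => simp

theorem pvSet_mid (s t : List Int) (a b y : Int) :
    (s ++ a :: b :: t).set s.length y = s ++ y :: b :: t := by
  induction s with
  | nil => rfl
  | cons z s ih => simp [ih]

theorem pvSet_mid1 (s t : List Int) (a b y : Int) :
    (s ++ a :: b :: t).set (s.length + 1) y = s ++ a :: y :: t := by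
  induction s with
  | nil => rfl
  | cons z s ih => simp [ih]

theorem pvInnerA_zero (arr : List Int) (c m : Int) : pvInnerA arr 0 c m = (arr, c, m) := by
  rw [pvInnerA]; simp

theorem pvInnerA_succ (arr : List Int) (j : Nat) (c m : Int) :
    pvInnerA arr (j + 1) c m
      = if arr.getD (j + 1) 0 < arr.getD j 0 then
          pvInnerA ((arr.set (j + 1) (arr.getD j 0)).set j (arr.getD (j + 1) 0)) j (c + 1) (m + 1)
        else (arr, c + 1, m) := by
  rw [pvInnerA]; simp

-- A's inner loop inserts x into the sorted prefix s, paying pvGt swaps and pvBrk breaks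
theorem pvInnerA_spec (s : List Int) : ∀ (t : List Int) (x : Int) (c m : Int),
    s.Pairwise (· ≤ ·) →
    pvInnerA (s ++ x :: t) s.length c m
      = (pvIns s x ++ t, c + pvGt s x + pvBrk s x, m + pvGt s x) := by
  induction s using List.reverseRecOn with
  | nil =>
    intro t x c m _
    simp [pvInnerA_zero, pvIns, pvGt, pvBrk]
  | append_singleton s' a ih =>
    intro t x c m hs
    have hs' : s'.Pairwise (· ≤ ·) := hs.sublist (List.sublist_append_left _ _)
    have hall : ∀ u ∈ s', u ≤ a := by
      have h := (List.pairwise_append.mp hs).2.2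
      intro u hu; exact h u hu a (List.mem_singleton_self a)
    have harr : (s' ++ [a]) ++ x :: t = s' ++ a :: x :: t := by simp
    have hlen : (s' ++ [a]).length = s'.length + 1 := by simp
    rw [harr, hlen, pvInnerA_succ,
        pvGetD_mid1 s' t a x 0, pvGetD_mid s' t a x 0]
    by_cases hxa : x < a
    · rw [if_pos hxa, pvSet_mid1 s' t a x a, pvSet_mid s' t a a x, ih (a :: t) x (c + 1) (m + 1) hs']
      have hgt : pvGt (s' ++ [a]) x = pvGt s' x + 1 := by
        simp [pvGt, List.countP_append, hxa]
      have hbrk : pvBrk (s' ++ [a]) x = pvBrk s' x := by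
        have hle := s'.countP_le_length (p := fun a => decide (x < a))
        simp only [pvBrk, List.countP_append, List.countP_cons, List.countP_nil,
          List.length_append, List.length_singleton]
        simp [hxa]
      have hins : pvIns (s' ++ [a]) x ++ t = pvIns s' x ++ a :: t := by
        have h1 : decide (a ≤ x) = false := by simp [not_le.mpr hxa]
        have h2 : decide (x < a) = true := by simp [hxa]
        simp [pvIns, List.filter_append, h1, h2]
      rw [hgt, hbrk, hins]
      ring_nf
    · rw [if_neg hxa]
      have hax : a ≤ x := not_lt.mp hxa
      have hgt : pvGt (s' ++ [a]) x = 0 := by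
        have : ∀ u ∈ s' ++ [a], ¬ (x < u) := by
          intro u hu
          rcases List.mem_append.mp hu with hu' | hu'
          · exact not_lt.mpr (le_trans (le_trans (hall u hu') hax) le_rfl)
          · rcases List.mem_singleton.mp hu' with rfl
            exact hxa
        simp only [pvGt]
        rw [List.countP_eq_zero.mpr (by intro u hu; simpa using this u hu)]
        rfl
      have hbrk : pvBrk (s' ++ [a]) x = 1 := by
        have h0 : (s' ++ [a]).countP (fun a => decide (x < a)) = 0 := by
          have := hgt
          simp only [pvGt] at this
          exact_mod_cast this
        simp [pvBrk, h0]
      have hins : pvIns (s' ++ [a]) x = (s' ++ [a]) ++ [x] := by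
        have h1 : List.filter (fun u => decide (u ≤ x)) (s' ++ [a]) = s' ++ [a] := by
          rw [List.filter_eq_self]
          intro u hu
          rcases List.mem_append.mp hu with hu' | hu'
          · simpa using le_trans (hall u hu') hax
          · rcases List.mem_singleton.mp hu' with rfl; simpa using hax
        have h2 : List.filter (fun u => decide (x < u)) (s' ++ [a]) = [] := by
          rw [List.filter_eq_nil_iff]
          intro u hu
          rcases List.mem_append.mp hu with hu' | hu'
          · simpa using not_lt.mpr (le_trans (hall u hu') hax)
          · rcases List.mem_singleton.mp hu' with rfl; simpa using hxa
        simp [pvIns, h1, h2]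
      rw [hgt, hbrk, hins]
      simp

theorem pvCnt_perm (u : List Int) : ∀ {s s' : List Int}, s.Perm s' → pvCnt s u = pvCnt s' u := by
  induction u with
  | nil => intro s s' _; rfl
  | cons x u ih =>
    intro s s' h
    have hgt : pvGt s x = pvGt s' x := by simp [pvGt, h.countP_eq]
    have hbrk : pvBrk s x = pvBrk s' x := by simp [pvBrk, h.countP_eq, h.length_eq]
    simp only [pvCnt, hgt, hbrk, ih (h.cons x)]

-- the outer fold of A's port, abstractly
theorem pvFoldA (t : List Int) : ∀ (s : List Int) (c m : Int), s.Pairwise (· ≤ ·) →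
    ((List.range t.length).map (fun (k : Nat) => ((s.length : Nat) : Int) + (k : Int))).foldl
        (fun st i => pvInnerA st.1 i.toNat st.2.1 st.2.2) (s ++ t, c, m)
      = (t.foldl pvIns s, c + (pvCnt s t).1, m + (pvCnt s t).2) := by
  induction t with
  | nil => intro s c m _; simp [pvCnt]
  | cons x t ih =>
    intro s c m hs
    simp only [List.length_cons]
    rw [List.range_succ_eq_map]
    simp only [List.map_cons, List.foldl_cons, List.map_map]
    have h0 : ((s.length : Int) + ((0 : Nat) : Int)).toNat = s.length := by simp
    rw [h0, pvInnerA_spec s t x c m hs]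
    have hmap : (List.range t.length).map ((fun k : Nat => ((s.length : Int) + (k : Int))) ∘ Nat.succ)
        = (List.range t.length).map (fun k : Nat => (((pvIns s x).length : Nat) : Int) + (k : Int)) := by
      apply List.map_congr_left
      intro k _
      simp [pvIns_length, Function.comp]
      ring
    rw [hmap, ih (pvIns s x) _ _ (pvIns_sorted hs x)]
    have hcnt : pvCnt (pvIns s x) t = pvCnt (x :: s) t := pvCnt_perm t (pvIns_perm s x)
    simp only [pvCnt, hcnt, Prod.mk.injEq]
    refine ⟨trivial, by ring, by ring⟩

theorem pvCross_nil (u : List Int) : pvCross [] u = 0 := by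
  unfold pvCross
  induction u with
  | nil => rfl
  | cons x u _ => simp [pvGt]

theorem pvCross_cons (x : Int) (s u : List Int) :
    pvCross (x :: s) u = pvCross s u + ((u.countP (fun y => decide (y < x)) : Nat) : Int) := by
  induction u with
  | nil => rfl
  | cons y u ih =>
    simp only [pvCross, List.map_cons, List.sum_cons, List.countP_cons] at *
    rw [ih]
    simp only [pvGt, List.countP_cons]
    split_ifs with h <;> push_cast <;> ring

theorem pvCnt_moves (u : List Int) : ∀ (s : List Int), (pvCnt s u).2 = pvCross s u + pvInv u := by
  induction u with
  | nil => intro s; simp [pvCnt, pvCross, pvInv]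
  | cons x u ih =>
    intro s
    simp only [pvCnt]
    rw [ih (x :: s), pvCross_cons]
    simp only [pvCross, List.map_cons, List.sum_cons, pvInv]
    ring

theorem pvCnt_comps (u : List Int) : ∀ (s : List Int) (lo : Int), lo ∈ s → (∀ a ∈ s, lo ≤ a) →
    (pvCnt s u).1 = (pvCnt s u).2 + pvNb lo u := by
  induction u with
  | nil => intro s lo _ _; simp [pvCnt, pvNb]
  | cons x u ih =>
    intro s lo hmem hlb
    by_cases hx : x < lo
    · have hbrk : pvBrk s x = 0 := by
        have hall : ∀ a ∈ s, decide (x < a) = true := by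
          intro a ha; simpa using lt_of_lt_of_le hx (hlb a ha)
        simp [pvBrk, List.countP_eq_length.mpr hall]
      have ihx := ih (x :: s) x (List.mem_cons_self)
        (by intro a ha
            rcases List.mem_cons.mp ha with rfl | ha'
            · exact le_rfl
            · exact le_of_lt (lt_of_lt_of_le hx (hlb a ha')))
      simp only [pvCnt, hbrk, pvNb, if_pos hx, ihx]
      ring
    · have hbrk : pvBrk s x = 1 := by
        have hlt : s.countP (fun a => decide (x < a)) < s.length := by
          have hle := s.countP_le_length (p := fun a => decide (x < a))
          have hne : s.countP (fun a => decide (x < a)) ≠ s.length := by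
            intro he
            have := List.countP_eq_length.mp he lo hmem
            simp at this
            exact hx this
          omega
        simp [pvBrk, hlt]
      have ihx := ih (x :: s) lo (List.mem_cons_of_mem x hmem)
        (by intro a ha
            rcases List.mem_cons.mp ha with rfl | ha'
            · exact not_lt.mp hx
            · exact hlb a ha')
      simp only [pvCnt, hbrk, pvNb, if_neg hx, ihx]
      ring

theorem pvCross_perm_left {s s' : List Int} (h : s.Perm s') (u : List Int) :
    pvCross s u = pvCross s' u := by
  unfold pvCross
  congr 1
  apply List.map_congr_left
  intro x _
  simp [pvGt, h.countP_eq]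

theorem pvCross_perm_right (s : List Int) {u u' : List Int} (h : u.Perm u') :
    pvCross s u = pvCross s u' := by
  exact List.Perm.sum_eq (h.map _)

theorem pvInv_append (l r : List Int) :
    pvInv (l ++ r) = pvInv l + pvInv r + pvCross l r := by
  induction l with
  | nil => simp [pvInv, pvCross_nil]
  | cons a l ih =>
    simp only [List.cons_append, pvInv, List.countP_append, ih, pvCross_cons]
    push_cast
    ring

theorem pvMergeC_spec : ∀ (l r : List Int), l.Pairwise (· ≤ ·) → r.Pairwise (· ≤ ·) →
    (pvMergeC l r).1.Perm (l ++ r) ∧ (pvMergeC l r).1.Pairwise (· ≤ ·) ∧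
      (pvMergeC l r).2 = pvCross l r := by
  intro l r
  fun_induction pvMergeC l r with
  | case1 r =>
    intro _ hr
    exact ⟨List.Perm.refl _, hr, (pvCross_nil r).symm⟩
  | case2 a l =>
    intro hl _
    refine ⟨by simp, hl, ?_⟩
    simp [pvCross]
  | case3 a l b r hba p ih =>
    intro hl hr
    obtain ⟨hperm, hsort, hcross⟩ := ih hl hr.of_cons
    have halb : ∀ y ∈ a :: l, b ≤ y := by
      intro y hy
      rcases List.mem_cons.mp hy with rfl | hy'
      · exact le_of_lt hba
      · exact le_of_lt (lt_of_lt_of_le hba ((List.pairwise_cons.mp hl).1 y hy'))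
    refine ⟨?_, ?_, ?_⟩
    · exact (hperm.cons b).trans List.perm_middle.symm
    · rw [List.pairwise_cons]
      refine ⟨?_, hsort⟩
      intro y hy
      rcases List.mem_append.mp (hperm.mem_iff.mp hy) with hy' | hy'
      · exact halb y hy'
      · exact (List.pairwise_cons.mp hr).1 y hy'
    · have hblt : ∀ y ∈ a :: l, b < y := by
        intro y hy
        rcases List.mem_cons.mp hy with rfl | hy'
        · exact hba
        · exact lt_of_lt_of_le hba ((List.pairwise_cons.mp hl).1 y hy')
      have hgt : pvGt (a :: l) b = ((a :: l).length : Int) := by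
        unfold pvGt
        rw [List.countP_eq_length.mpr (by intro y hy; simpa using hblt y hy)]
      show (pvMergeC (a :: l) r).2 + ((a :: l).length : Int) = pvCross (a :: l) (b :: r)
      simp only [pvCross, List.map_cons, List.sum_cons]
      rw [hcross, hgt]
      simp only [pvCross]
      ring
  | case4 a l b r hba p ih =>
    intro hl hr
    obtain ⟨hperm, hsort, hcross⟩ := ih hl.of_cons hr
    have hab : a ≤ b := not_lt.mp hba
    have hble : ∀ y ∈ b :: r, a ≤ y := by
      intro y hy
      rcases List.mem_cons.mp hy with rfl | hy'
      · exact hab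
      · exact le_trans hab ((List.pairwise_cons.mp hr).1 y hy')
    refine ⟨?_, ?_, ?_⟩
    · simpa using hperm.cons a
    · rw [List.pairwise_cons]
      refine ⟨?_, hsort⟩
      intro y hy
      rcases List.mem_append.mp (hperm.mem_iff.mp hy) with hy' | hy'
      · exact (List.pairwise_cons.mp hl).1 y hy'
      · exact hble y hy'
    · have h0 : (b :: r).countP (fun y => decide (y < a)) = 0 :=
        List.countP_eq_zero.mpr (by intro y hy; simpa using not_lt.mpr (hble y hy))
      have := pvCross_cons a l (b :: r)
      rw [hcross, this, h0]
      simp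

theorem pvSortC_spec (xs : List Int) :
    (pvSortC xs).1.Perm xs ∧ (pvSortC xs).1.Pairwise (· ≤ ·) ∧ (pvSortC xs).2 = pvInv xs := by
  induction xs using pvSortC.induct with
  | case1 xs h =>
    rw [pvSortC]
    rw [if_pos h]
    refine ⟨List.Perm.refl _, ?_, ?_⟩
    · match xs, h with
      | [], _ => exact List.Pairwise.nil
      | [a], _ => simp
    · match xs, h with
      | [], _ => rfl
      | [a], _ => simp [pvInv]
  | case2 xs h mid ihl ihr =>
    obtain ⟨lperm, lsort, lcnt⟩ := ihl
    obtain ⟨rperm, rsort, rcnt⟩ := ihr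
    obtain ⟨mperm, msort, mcnt⟩ :=
      pvMergeC_spec (pvSortC (xs.take mid)).1 (pvSortC (xs.drop mid)).1 lsort rsort
    rw [pvSortC, if_neg h]
    simp only []
    have happ : (xs.take (mid) ++ xs.drop (mid)) = xs :=
      List.take_append_drop _ xs
    refine ⟨?_, msort, ?_⟩
    · exact mperm.trans ((lperm.append rperm).trans (by rw [happ]))
    · have hcr : pvCross (pvSortC (xs.take (mid))).1 (pvSortC (xs.drop (mid))).1
          = pvCross (xs.take (mid)) (xs.drop (mid)) := by
        rw [pvCross_perm_left lperm, pvCross_perm_right _ rperm]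
      have hinv : pvInv xs = pvInv (xs.take (mid)) + pvInv (xs.drop (mid))
          + pvCross (xs.take (mid)) (xs.drop (mid)) := by
        conv_lhs => rw [← happ]
        exact pvInv_append _ _
      rw [mcnt, lcnt, rcnt, hcr, hinv]

theorem pvFoldB (u : List Int) : ∀ (k lo : Int),
    (u.foldl
      (fun (p : Int × Option Int) x =>
        match p.2 with
        | none => (p.1, some x)
        | some lo => if x < lo then (p.1, some x) else (p.1 + 1, some lo))
      (k, some lo)).1 = k + pvNb lo u := by
  induction u with
  | nil => intro k lo; simp [pvNb]
  | cons x u ih =>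
    intro k lo
    simp only [List.foldl_cons]
    by_cases h : x < lo
    · rw [if_pos h]; simp only [pvNb, if_pos h, ih]
    · rw [if_neg h]; simp only [pvNb, if_neg h, ih]; ring

-- ===== VERDICT =====
theorem insertion_sort_exchanges_spec : Claim_equal_insertion_sort_exchanges := by
  intro arr _
  unfold Spec_insertion_sort_exchanges
  cases arr with
  | nil =>
    unfold insertion_sort_exchanges insertion_sort_exchanges_alt
    simp only []
    rw [PySem.List.pyRange_one]
    simp [pvSortC]
  | cons a t =>
    unfold insertion_sort_exchanges insertion_sort_exchanges_alt
    simp only []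
    rw [PySem.List.pyRange_one]
    have hlen : ((((a :: t).length : Nat) : Int) - 1).toNat = t.length := by simp
    rw [hlen]
    have hm : (List.range t.length).map (fun (k : Nat) => (1 : Int) + (k : Int))
        = (List.range t.length).map (fun (k : Nat) => ((([a] : List Int).length : Nat) : Int) + (k : Int)) := by
      simp
    rw [hm]
    have hinit : (a :: t : List Int) = [a] ++ t := rfl
    rw [hinit, pvFoldA t [a] 0 0 (by simp)]
    rw [← hinit]
    have hmoves : (pvCnt [a] t).2 = pvInv (a :: t) := by
      rw [pvCnt_moves, pvCross_cons a [] t, pvCross_nil]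
      simp only [pvInv]
      ring
    have hcomps : (pvCnt [a] t).1 = (pvCnt [a] t).2 + pvNb a t :=
      pvCnt_comps t [a] a (List.mem_singleton_self a)
        (by intro u hu; rcases List.mem_singleton.mp hu with rfl; exact le_rfl)
    have hsort : (pvSortC (a :: t)).2 = pvInv (a :: t) := (pvSortC_spec (a :: t)).2.2
    simp only [List.foldl_cons]
    rw [pvFoldB t _ a]
    simp only [hsort, hcomps, hmoves, Prod.mk.injEq]
    constructor <;> ring
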